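-- pv_equiv track=rewrite | github.com/CR1337/b14-automation | lib/auto_text/erwerbslosigkeit.py | _last_5_months
-- ===== SOURCE A (Python) =====
-- def _last_5_months(year: int, month: int):
--     months = []
--     for i in range(5):
--         y = year
--         m = month - i
--         while m <= 0:
--             m += 12
--             y -= 1
--         months.append(f"{y:04d}-{m:02d}")
--     return months
-- ===== SOURCE B (Python) =====
-- def _last_5_months(year: int, month: int):
--     y, m = year, month
--     while m <= 0:
--         m += 12
--         y -= 1
--     out = []
--     for _ in range(5):
--         out.append(f"{y:04d}-{m:02d}")
--         m -= 1
--         if m == 0: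
--             m = 12
--             y -= 1
--     return out
-- ===== Notes on version B (the rewrite author's own statement) =====
-- stated objective: simpler
-- what changed: B normalizes the (year, month) pair once with the while loop and then threads a running (y, m) state through the 5 iterations (decrement, roll 0 back to December), instead of recomputing month-i and re-running the normalization loop inside every iteration.
import Mathlib
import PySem

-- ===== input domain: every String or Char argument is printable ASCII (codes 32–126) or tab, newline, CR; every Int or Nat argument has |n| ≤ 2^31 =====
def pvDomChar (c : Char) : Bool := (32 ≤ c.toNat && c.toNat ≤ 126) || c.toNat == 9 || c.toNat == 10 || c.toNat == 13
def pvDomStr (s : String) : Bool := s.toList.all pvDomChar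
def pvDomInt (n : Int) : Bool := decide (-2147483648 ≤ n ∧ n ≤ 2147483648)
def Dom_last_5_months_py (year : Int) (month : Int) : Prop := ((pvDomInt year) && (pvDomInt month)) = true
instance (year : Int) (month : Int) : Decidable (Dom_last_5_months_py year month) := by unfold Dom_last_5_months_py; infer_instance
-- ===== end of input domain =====

-- B rewrites A by normalizing (year, month) once and threading a running (y, m) state
-- through the 5 iterations instead of recomputing month-i with an inner while loop each time
-- (objective: simpler). Exact equivalence, no precondition.

-- shared formatting helper: Python f"{n:0{w}d}" (zero-pad to width w, sign before the zeros)
def pyFmt (w : Nat) (n : Int) : String :=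
  let ds := toString n.natAbs
  if n < 0 then "-" ++ String.ofList (List.replicate (w - 1 - ds.length) '0') ++ ds
  else String.ofList (List.replicate (w - ds.length) '0') ++ ds

-- ===== PORT A =====
-- A's inner 'while m <= 0: m += 12; y -= 1' loop
def whileA (y m : Int) : Int × Int :=
  if m ≤ 0 then whileA (y - 1) (m + 12) else (y, m)
termination_by (1 - m).toNat
decreasing_by omega

def last_5_months_py (year : Int) (month : Int) : List String :=
  (PySem.List.pyRange 0 5 1).foldl (fun months i =>
    let p := whileA year (month - i)
    months ++ [pyFmt 4 p.1 ++ "-" ++ pyFmt 2 p.2]) []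

-- ===== PORT B =====
-- B's initial 'while m <= 0' normalization loop
def whileB (y m : Int) : Int × Int :=
  if m ≤ 0 then whileB (y - 1) (m + 12) else (y, m)
termination_by (1 - m).toNat
decreasing_by omega

-- B's 'for _ in range(5)' loop threading the running (y, m) state
def goB : Nat → Int → Int → List String → List String
  | 0, _, _, out => out
  | n + 1, y, m, out =>
      let out := out ++ [pyFmt 4 y ++ "-" ++ pyFmt 2 m]
      let m' := m - 1
      if m' = 0 then goB n (y - 1) 12 out else goB n y m' out

def last_5_months_py_alt (year : Int) (month : Int) : List String :=
  let p := whileB year month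
  goB 5 p.1 p.2 []

-- ===== PRECONDITION & SPEC =====
def Spec_last_5_months_py (year : Int) (month : Int) (out : List String) : Prop := out = last_5_months_py_alt year month
instance (year : Int) (month : Int) (out : List String) : Decidable (Spec_last_5_months_py year month out) := by unfold Spec_last_5_months_py; infer_instance

-- ===== CLAIM (what is proved, stated in full; the proofs are below) =====
def Claim_equal_last_5_months_py : Prop := ∀ (year : Int) (month : Int), Dom_last_5_months_py year month → Spec_last_5_months_py year month (last_5_months_py year month)

-- ===== LEMMAS AND PROOFS =====

lemma whileB_eq_whileA (y m : Int) : whileB y m = whileA y m := by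
  fun_induction whileB y m with
  | case1 y m h ih => rw [whileA, if_pos h]; exact ih
  | case2 y m h => rw [whileA, if_neg h]

lemma whileA_of_pos (y m : Int) (h : 1 ≤ m) : whileA y m = (y, m) := by
  rw [whileA, if_neg (by omega)]

-- B's per-iteration step applied to a normalized pair = A's normalization of the predecessor month
def stepP (p : Int × Int) : Int × Int :=
  if p.2 - 1 = 0 then (p.1 - 1, 12) else (p.1, p.2 - 1)

lemma stepP_whileA (y m : Int) : stepP (whileA y m) = whileA y (m - 1) := by
  fun_induction whileA y m with
  | case1 y m h ih =>
      conv_rhs => rw [whileA]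
      rw [if_pos (show m - 1 ≤ 0 by omega), show m - 1 + 12 = m + 12 - 1 by ring]
      exact ih
  | case2 y m h =>
      by_cases hm : m = 1
      · subst hm
        simp only [stepP]
        rw [whileA, if_pos (by omega), whileA_of_pos _ _ (by omega)]
        norm_num
      · rw [whileA_of_pos _ _ (by omega)]
        simp only [stepP]
        rw [if_neg (by omega)]

lemma goB_succ (n : Nat) (y m : Int) (out : List String) :
    goB (n + 1) y m out =
      goB n (stepP (y, m)).1 (stepP (y, m)).2 (out ++ [pyFmt 4 y ++ "-" ++ pyFmt 2 m]) := by
  rw [goB]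
  simp only [stepP]
  by_cases h : m - 1 = 0 <;> simp [h]

-- ===== VERDICT (by name: the statement is the Claim_ definition above) =====
theorem last_5_months_py_spec : Claim_equal_last_5_months_py := by
  intro year month _
  unfold Spec_last_5_months_py last_5_months_py last_5_months_py_alt
  have hr : PySem.List.pyRange 0 5 1 = [0, 1, 2, 3, 4] := by decide
  rw [hr]
  simp only [List.foldl, whileB_eq_whileA]
  rw [goB_succ, goB_succ, goB_succ, goB_succ, goB_succ]
  rw [stepP_whileA]
  rw [stepP_whileA, show month - 1 - 1 = month - 2 by ring]
  rw [stepP_whileA, show month - 2 - 1 = month - 3 by ring]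
  rw [stepP_whileA, show month - 3 - 1 = month - 4 by ring]
  norm_num [goB]
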